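-- pv_equiv track=rewrite | github.com/thomasxm/CrowdSentinels-AI-MCP | src/wireshark/hunting/ioc_hunter.py | hunt_domains
-- ===== SOURCE A (Python) =====
-- def hunt_domains(
--
--     domain_iocs: list[str],
--     dns_queries: list[dict],
--     include_subdomains: bool = True
-- ) -> list[dict]:
--     """Hunt for domains in DNS query data.
--
--     Args:
--         domain_iocs: List of domains to hunt for
--         dns_queries: List of DNS query dicts with query_name
--         include_subdomains: Also match subdomains of IoC domains
--
--     Returns:
--         List of matching queries
--     """
--     if not domain_iocs:
--         return []
--
--     matches = []
--
--     for query in dns_queries: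
--         query_name = query.get("query_name", "").lower()
--
--         for domain in domain_iocs:
--             domain_lower = domain.lower()
--             matched = False
--
--             if query_name == domain_lower or include_subdomains and query_name.endswith("." + domain_lower):
--                 matched = True
--
--             if matched:
--                 match_result = query.copy()
--                 match_result["matched_ioc"] = domain
--                 match_result["match_type"] = "domain"
--                 matches.append(match_result)
--                 break  # Don't double-match
--
--     return matches
-- ===== SOURCE B (Python) =====
-- def hunt_domains(
--     domain_iocs: list[str],
--     dns_queries: list[dict],
--     include_subdomains: bool = True
-- ) -> list[dict]:
--     """Hash the IoCs once (lowercased -> (first index, original)); for each query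
--     look up the query name and its dot-suffixes and keep the lowest-index hit."""
--     idx = {}
--     for i, dom in enumerate(domain_iocs):
--         idx.setdefault(dom.lower(), (i, dom))
--
--     matches = []
--     for query in dns_queries:
--         qn = query.get("query_name", "").lower()
--         cands = [qn]
--         if include_subdomains:
--             for j, ch in enumerate(qn):
--                 if ch == '.':
--                     cands.append(qn[j + 1:])
--         best = None
--         for c in cands:
--             hit = idx.get(c)
--             if hit is not None and (best is None or hit[0] < best[0]):
--                 best = hit
--         if best is not None:
--             m = dict(query)
--             m["matched_ioc"] = best[1]
--             m["match_type"] = "domain"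
--             matches.append(m)
--     return matches
-- ===== Notes on version B (the rewrite author's own statement) =====
-- stated objective: faster
-- what changed: Replaced the per-query linear scan over all IoC domains by a dict built once from the lowercased IoCs (keeping first index and original spelling); each query then looks up only its own name and its dot-suffixes and keeps the hit with the lowest IoC index, which reproduces A's first-match-in-IoC-order result.
import Mathlib
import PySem

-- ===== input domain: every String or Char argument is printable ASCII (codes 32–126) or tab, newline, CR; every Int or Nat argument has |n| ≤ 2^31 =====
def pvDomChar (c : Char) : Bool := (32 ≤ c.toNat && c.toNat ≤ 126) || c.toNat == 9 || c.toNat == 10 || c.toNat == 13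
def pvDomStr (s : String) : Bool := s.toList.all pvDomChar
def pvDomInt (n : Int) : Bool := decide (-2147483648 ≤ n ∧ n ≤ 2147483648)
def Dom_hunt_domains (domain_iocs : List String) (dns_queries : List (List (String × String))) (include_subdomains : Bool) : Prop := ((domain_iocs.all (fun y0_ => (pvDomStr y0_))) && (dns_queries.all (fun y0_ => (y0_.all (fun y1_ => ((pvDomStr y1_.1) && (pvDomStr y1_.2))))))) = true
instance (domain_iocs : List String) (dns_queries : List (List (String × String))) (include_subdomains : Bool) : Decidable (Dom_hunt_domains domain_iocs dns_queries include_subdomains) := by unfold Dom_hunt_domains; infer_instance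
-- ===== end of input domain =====

-- B replaces A's per-query scan over all IoCs by a hash index of lowercased IoCs plus
-- dot-suffix lookups per query, keeping the lowest-index hit (objective: faster).


-- ===== PORT A =====
-- query.copy(); copy["matched_ioc"] = d; copy["match_type"] = "domain"  (shared emit step)
def pvEmit (q : PySem.Dict String String) (d : String) : List (String × String) :=
  ((q.insert "matched_ioc" d).insert "match_type" "domain").items

-- A's inner 'for domain in domain_iocs: … break' loop: first matching domain
def pvInnerA (qnl : List Char) (inc : Bool) : List String → Option String
  | [] => none
  | d :: rest =>
    let dl := PySem.Chars.lower d.toList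
    if qnl == dl || (inc && PySem.Chars.endswith qnl ('.' :: dl)) then some d
    else pvInnerA qnl inc rest

def hunt_domains (domain_iocs : List String) (dns_queries : List (List (String × String))) (include_subdomains : Bool) : List (List (String × String)) :=
  if domain_iocs = [] then []
  else
    dns_queries.foldl (fun ms query =>
      let q := PySem.Dict.ofList query
      let qnl := PySem.Chars.lower (q.getD "query_name" "").toList
      match pvInnerA qnl include_subdomains domain_iocs with
      | some d => ms ++ [pvEmit q d]
      | none => ms) []

-- ===== PORT B =====
-- the for-loop filling idx with setdefault(dom.lower(), (i, dom))
def pvBuildIdx : PySem.Dict (List Char) (Int × String) → List (Int × String) → PySem.Dict (List Char) (Int × String)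
  | d, [] => d
  | d, (i, dom) :: rest => pvBuildIdx (d.setdefault (PySem.Chars.lower dom.toList) (i, dom)) rest

-- the 'for j, ch in enumerate(qn): if ch == '.': cands.append(qn[j+1:])' loop
def pvDotSuffixes : List Char → List (List Char)
  | [] => []
  | c :: rest => if c = '.' then rest :: pvDotSuffixes rest else pvDotSuffixes rest

-- the 'for c in cands: …' loop keeping the lowest-index hit
def pvBestHit (idx : PySem.Dict (List Char) (Int × String)) : List (List Char) → Option (Int × String) → Option (Int × String)
  | [], best => best
  | c :: rest, best =>
    match idx.get? c with
    | none => pvBestHit idx rest best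
    | some hit =>
      pvBestHit idx rest
        (match best with
         | none => some hit
         | some b => if hit.1 < b.1 then some hit else some b)

def hunt_domains_alt (domain_iocs : List String) (dns_queries : List (List (String × String))) (include_subdomains : Bool) : List (List (String × String)) :=
  let idx := pvBuildIdx PySem.Dict.empty (PySem.List.enumerate domain_iocs)
  dns_queries.filterMap (fun query =>
    let q := PySem.Dict.ofList query
    let qnl := PySem.Chars.lower (q.getD "query_name" "").toList
    let cands := qnl :: (if include_subdomains then pvDotSuffixes qnl else [])
    (pvBestHit idx cands none).map (fun h => pvEmit q h.2))

-- ===== PRECONDITION & SPEC =====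
def Spec_hunt_domains (domain_iocs : List String) (dns_queries : List (List (String × String))) (include_subdomains : Bool) (out : List (List (String × String))) : Prop := out = hunt_domains_alt domain_iocs dns_queries include_subdomains
instance (domain_iocs : List String) (dns_queries : List (List (String × String))) (include_subdomains : Bool) (out : List (List (String × String))) : Decidable (Spec_hunt_domains domain_iocs dns_queries include_subdomains out) := by unfold Spec_hunt_domains; infer_instance

-- ===== CLAIM (what is proved, stated in full; the proofs are below) =====
def Claim_equal_hunt_domains : Prop := ∀ (domain_iocs : List String) (dns_queries : List (List (String × String))) (include_subdomains : Bool), Dom_hunt_domains domain_iocs dns_queries include_subdomains → Spec_hunt_domains domain_iocs dns_queries include_subdomains (hunt_domains domain_iocs dns_queries include_subdomains)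

-- ===== LEMMAS AND PROOFS =====

-- pvInnerA is find? over the IoC list with A's match condition
theorem pvInnerA_eq_find? (qnl : List Char) (inc : Bool) (iocs : List String) :
    pvInnerA qnl inc iocs
      = iocs.find? (fun d => qnl == PySem.Chars.lower d.toList
          || (inc && PySem.Chars.endswith qnl ('.' :: PySem.Chars.lower d.toList))) := by
  induction iocs with
  | nil => rfl
  | cons d rest ih =>
    simp only [pvInnerA, List.find?_cons, ih]
    cases hb : (qnl == PySem.Chars.lower d.toList
        || (inc && PySem.Chars.endswith qnl ('.' :: PySem.Chars.lower d.toList))) <;> simp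

-- pvDotSuffixes collects exactly the pieces after a dot
theorem mem_pvDotSuffixes (l s : List Char) :
    s ∈ pvDotSuffixes l ↔ ('.' :: s) <:+ l := by
  induction l with
  | nil => simp [pvDotSuffixes]
  | cons c rest ih =>
    simp only [pvDotSuffixes]
    rw [List.suffix_cons_iff]
    by_cases hc : c = '.'
    · subst hc
      simp only [if_true, List.mem_cons, ih]
      constructor
      · rintro (rfl | hs)
        · exact Or.inl rfl
        · exact Or.inr hs
      · rintro (he | hs)
        · injection he with _ h2; exact Or.inl h2
        · exact Or.inr hs
    · rw [if_neg hc, ih]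
      constructor
      · exact fun h => Or.inr h
      · rintro (he | hs)
        · exact absurd (List.cons_eq_cons.mp he).1 (fun h => hc h.symm)
        · exact hs

-- A's match condition tests membership of the lowered IoC in B's candidate list
theorem matchcond_eq_mem (qnl dl : List Char) (inc : Bool) :
    (qnl == dl || (inc && PySem.Chars.endswith qnl ('.' :: dl)))
      = decide (dl ∈ qnl :: (if inc then pvDotSuffixes qnl else [])) := by
  cases inc with
  | false =>
    simp only [Bool.false_and, Bool.or_false, Bool.false_eq_true, if_false, List.mem_singleton]
    rw [Bool.eq_iff_iff, beq_iff_eq, decide_eq_true_eq]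
    exact eq_comm
  | true =>
    simp only [Bool.true_and, if_true, List.mem_cons]
    rw [Bool.eq_iff_iff]
    simp only [Bool.or_eq_true, beq_iff_eq, decide_eq_true_eq, PySem.Chars.endswith_iff]
    constructor
    · rintro (h | h)
      · exact Or.inl h.symm
      · exact Or.inr ((mem_pvDotSuffixes _ _).mpr h)
    · rintro (h | h)
      · exact Or.inl h.symm
      · exact Or.inr ((mem_pvDotSuffixes _ _).mp h)

-- lookup in the built index = first enumerated IoC with that lowercased name
theorem get?_pvBuildIdx (E : List (Int × String)) (acc : PySem.Dict (List Char) (Int × String)) (k : List Char) :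
    (pvBuildIdx acc E).get? k
      = (acc.get? k).or (E.find? (fun p => PySem.Chars.lower p.2.toList == k)) := by
  induction E generalizing acc with
  | nil => simp [pvBuildIdx]
  | cons p rest ih =>
    obtain ⟨i, dom⟩ := p
    simp only [pvBuildIdx, ih, List.find?_cons]
    by_cases hk : PySem.Chars.lower dom.toList = k
    · subst hk
      rw [PySem.Dict.get?_setdefault_self]
      simp only [beq_self_eq_true]
      cases acc.get? (PySem.Chars.lower dom.toList) <;> rfl
    · rw [PySem.Dict.get?_setdefault_of_ne _ _ (Ne.symm hk),
        show (PySem.Chars.lower dom.toList == k) = false by simpa using hk]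

-- pvBestHit is none iff it started none and no candidate is in the index
theorem pvBestHit_eq_none (idx : PySem.Dict (List Char) (Int × String))
    (cs : List (List Char)) (best : Option (Int × String)) :
    pvBestHit idx cs best = none ↔ best = none ∧ ∀ c ∈ cs, idx.get? c = none := by
  induction cs generalizing best with
  | nil => simp [pvBestHit]
  | cons c rest ih =>
    simp only [pvBestHit]
    cases hg : idx.get? c with
    | none => rw [ih]; simp [hg]
    | some hit =>
      rw [ih]
      have hb' : (match best with
          | none => some hit
          | some b => if hit.1 < b.1 then some hit else some b) ≠ none := by
        cases best with
        | none => simp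
        | some b => by_cases hlt : hit.1 < b.1 <;> simp [hlt]
      constructor
      · rintro ⟨h1, -⟩; exact absurd h1 hb'
      · rintro ⟨-, hall⟩
        exact absurd (hall c List.mem_cons_self) (by simp [hg])

-- any result of pvBestHit is the initial best or an index hit of some candidate
theorem pvBestHit_mem (idx : PySem.Dict (List Char) (Int × String))
    (cs : List (List Char)) (best : Option (Int × String)) (h : Int × String)
    (hr : pvBestHit idx cs best = some h) :
    best = some h ∨ ∃ c ∈ cs, idx.get? c = some h := by
  induction cs generalizing best with
  | nil => left; exact hr
  | cons c rest ih =>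
    simp only [pvBestHit] at hr
    cases hg : idx.get? c with
    | none =>
      rw [hg] at hr
      rcases ih _ hr with h1 | ⟨c', hc', hg'⟩
      · left; exact h1
      · right; exact ⟨c', List.mem_cons_of_mem _ hc', hg'⟩
    | some hit =>
      rw [hg] at hr
      rcases ih _ hr with h1 | ⟨c', hc', hg'⟩
      · cases best with
        | none =>
          right
          exact ⟨c, List.mem_cons_self, by rw [hg, Option.some.inj h1]⟩
        | some b =>
          have h1' : (if hit.1 < b.1 then some hit else some b) = some h := h1
          by_cases hlt : hit.1 < b.1
          · rw [if_pos hlt] at h1'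
            right
            exact ⟨c, List.mem_cons_self, by rw [hg, Option.some.inj h1']⟩
          · rw [if_neg hlt] at h1'
            left
            rw [Option.some.inj h1']
      · right; exact ⟨c', List.mem_cons_of_mem _ hc', hg'⟩

-- the result of pvBestHit has minimal index among initial best and all hits
theorem pvBestHit_min (idx : PySem.Dict (List Char) (Int × String))
    (cs : List (List Char)) (best : Option (Int × String)) (h : Int × String)
    (hr : pvBestHit idx cs best = some h) :
    (∀ b, best = some b → h.1 ≤ b.1) ∧ (∀ c ∈ cs, ∀ h', idx.get? c = some h' → h.1 ≤ h'.1) := by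
  induction cs generalizing best with
  | nil =>
    refine ⟨fun b hb => ?_, by simp⟩
    simp only [pvBestHit] at hr
    rw [hr] at hb; rw [Option.some.inj hb]
  | cons c rest ih =>
    simp only [pvBestHit] at hr
    cases hg : idx.get? c with
    | none =>
      rw [hg] at hr
      obtain ⟨m1, m2⟩ := ih _ hr
      refine ⟨m1, ?_⟩
      intro c' hc' h' hg'
      rcases List.mem_cons.mp hc' with rfl | hc'
      · rw [hg] at hg'; cases hg'
      · exact m2 c' hc' h' hg'
    | some hit =>
      rw [hg] at hr
      obtain ⟨m1, m2⟩ := ih _ hr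
      have hhit : h.1 ≤ hit.1 ∧ ∀ b, best = some b → h.1 ≤ b.1 := by
        cases best with
        | none => exact ⟨m1 hit rfl, by simp⟩
        | some b =>
          by_cases hlt : hit.1 < b.1
          · have h1 := m1 hit
              (show (if hit.1 < b.1 then some hit else some b) = some hit from if_pos hlt)
            refine ⟨h1, ?_⟩
            rintro b' hb'
            have hbb : b = b' := Option.some.inj hb'
            subst hbb
            omega
          · have h1 := m1 b
              (show (if hit.1 < b.1 then some hit else some b) = some b from if_neg hlt)
            refine ⟨by omega, ?_⟩
            rintro b' hb'
            have hbb : b = b' := Option.some.inj hb'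
            subst hbb
            exact h1
      refine ⟨hhit.2, ?_⟩
      intro c' hc' h' hg'
      rcases List.mem_cons.mp hc' with rfl | hc'
      · rw [hg] at hg'; rw [← Option.some.inj hg']; exact hhit.1
      · exact m2 c' hc' h' hg'

-- per-query core: B's lowest-index suffix lookup = A's first matching IoC
theorem hunt_domains_key (iocs : List String) (qnl : List Char) (inc : Bool) :
    (pvBestHit (pvBuildIdx PySem.Dict.empty (PySem.List.enumerate iocs))
        (qnl :: (if inc then pvDotSuffixes qnl else [])) none).map (fun h => h.2)
      = pvInnerA qnl inc iocs := by
  set cands := qnl :: (if inc then pvDotSuffixes qnl else []) with hcands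
  set idx := pvBuildIdx PySem.Dict.empty (PySem.List.enumerate iocs) with hidx
  have hget : ∀ c, idx.get? c
      = (PySem.List.enumerate iocs).find? (fun p => PySem.Chars.lower p.2.toList == c) := by
    intro c; rw [hidx, get?_pvBuildIdx]; simp
  -- every hit decodes to a first-occurrence enumerated IoC
  have fact1 : ∀ (c : List Char) (i : Int) (d : String), idx.get? c = some (i, d) →
      ∃ n : Nat, i = (n : Int) ∧ ∃ hn : n < iocs.length, d = iocs[n] ∧
        PySem.Chars.lower d.toList = c ∧
        ∀ m, (hm : m < n) → PySem.Chars.lower (iocs[m]'(by omega)).toList ≠ c := by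
    intro c i d hc
    rw [hget c, List.find?_eq_some_iff_getElem] at hc
    obtain ⟨hp, n, hn, hel, hmin⟩ := hc
    have hnl : n < iocs.length := by
      have := PySem.List.length_enumerate iocs (0 : Int)
      omega
    rw [PySem.List.getElem_enumerate _ _ _ hn] at hel
    refine ⟨n, ?_, hnl, ?_, ?_, ?_⟩
    · have := congrArg Prod.fst hel; simpa using this.symm
    · exact (congrArg Prod.snd hel).symm
    · exact eq_of_beq (by simpa using hp)
    · intro m hm hcon
      have hmE : m < (PySem.List.enumerate iocs).length := by
        have := PySem.List.length_enumerate iocs (0 : Int)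
        omega
      have := hmin m (by omega)
      rw [PySem.List.getElem_enumerate _ _ _ hmE] at this
      simp [hcon] at this
  -- a candidate that is some IoC's lowered name is in the index
  have fact2 : ∀ (n : Nat) (hn : n < iocs.length),
      idx.get? (PySem.Chars.lower (iocs[n]'hn).toList) ≠ none := by
    intro n hn hcon
    rw [hget, List.find?_eq_none] at hcon
    have hmem : ((n : Int), iocs[n]'hn) ∈ PySem.List.enumerate iocs := by
      rw [PySem.List.mem_enumerate_iff]
      exact ⟨n, hn, by simp⟩
    simpa using hcon _ hmem
  rw [pvInnerA_eq_find?]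
  have hP : (fun (d : String) => qnl == PySem.Chars.lower d.toList
      || (inc && PySem.Chars.endswith qnl ('.' :: PySem.Chars.lower d.toList)))
      = fun (d : String) => decide (PySem.Chars.lower d.toList ∈ cands) := by
    funext d; exact matchcond_eq_mem qnl (PySem.Chars.lower d.toList) inc
  rw [hP]
  cases hfind : iocs.find? (fun d => decide (PySem.Chars.lower d.toList ∈ cands)) with
  | none =>
    rw [List.find?_eq_none] at hfind
    have : pvBestHit idx cands none = none := by
      rw [pvBestHit_eq_none]
      refine ⟨rfl, fun c hc => ?_⟩
      cases hg : idx.get? c with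
      | none => rfl
      | some p =>
        obtain ⟨i, d⟩ := p
        obtain ⟨n, -, hn, hd, hlow, -⟩ := fact1 c i d hg
        have : d ∈ iocs := hd ▸ List.getElem_mem hn
        have := hfind d this
        rw [hlow] at this
        simp [hc] at this
    rw [this]; rfl
  | some d0 =>
    rw [List.find?_eq_some_iff_getElem] at hfind
    obtain ⟨hp0, n0, hn0, hd0, hmin0⟩ := hfind
    have hc0mem : PySem.Chars.lower d0.toList ∈ cands := of_decide_eq_true hp0
    have hlow0 : PySem.Chars.lower (iocs[n0]'hn0).toList = PySem.Chars.lower d0.toList := by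
      rw [hd0]
    -- pvBestHit is not none
    have hne : pvBestHit idx cands none ≠ none := by
      intro hcon
      rw [pvBestHit_eq_none] at hcon
      exact fact2 n0 hn0 (by rw [hlow0]; exact hcon.2 _ hc0mem)
    obtain ⟨h, hh⟩ := Option.ne_none_iff_exists'.mp hne
    rcases pvBestHit_mem idx cands none h hh with hbad | ⟨c1, hc1, hg1⟩
    · cases hbad
    obtain ⟨n1, hi1, hn1, hd1, hlow1, -⟩ := fact1 c1 h.1 h.2 (by simpa using hg1)
    -- n0 ≤ n1 : minimality of the find? result
    have h01 : n0 ≤ n1 := by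
      by_contra hlt
      have := hmin0 n1 (by omega)
      rw [← hd1, hlow1] at this
      simp [hc1] at this
    -- h.1 ≤ index of the hit at candidate c0 := lower d0 ≤ n0
    have hne2 : idx.get? (PySem.Chars.lower d0.toList) ≠ none := by
      rw [← hlow0]; exact fact2 n0 hn0
    obtain ⟨h0v, hg0⟩ := Option.ne_none_iff_exists'.mp hne2
    obtain ⟨m0, hi0, hm0, hdm0, hlowm0, hminm0⟩ :=
      fact1 _ h0v.1 h0v.2 (by simpa using hg0)
    have hm0n0 : m0 ≤ n0 := by
      by_contra hlt
      exact hminm0 n0 (by omega) hlow0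
    have hle : h.1 ≤ h0v.1 :=
      (pvBestHit_min idx cands none h hh).2 _ hc0mem h0v hg0
    have hn1n0 : n1 = n0 := by
      rw [hi1] at hle
      rw [hi0] at hle
      omega
    rw [hh]
    simp only [Option.map_some]
    rw [hd1]
    simp only [hn1n0]
    rw [hd0]

-- A's append-on-match fold is a filterMap of the optional per-query result
theorem foldl_emit_eq_filterMap {α β : Type} (g : α → Option β) (l : List α) (acc : List β) :
    l.foldl (fun ms q => ms ++ (g q).toList) acc = acc ++ l.filterMap g := by
  induction l generalizing acc with
  | nil => simp
  | cons q rest ih =>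
    cases hq : g q <;> simp [List.foldl_cons, hq, ih]

-- B's per-query result, rewritten through hunt_domains_key
theorem perquery_eq (iocs : List String) (inc : Bool) (query : List (String × String)) :
    (pvBestHit (pvBuildIdx PySem.Dict.empty (PySem.List.enumerate iocs))
        (PySem.Chars.lower ((PySem.Dict.ofList query).getD "query_name" "").toList
          :: (if inc then
                pvDotSuffixes (PySem.Chars.lower ((PySem.Dict.ofList query).getD "query_name" "").toList)
              else [])) none).map (fun h => pvEmit (PySem.Dict.ofList query) h.2)
      = (pvInnerA (PySem.Chars.lower ((PySem.Dict.ofList query).getD "query_name" "").toList)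
          inc iocs).map (pvEmit (PySem.Dict.ofList query)) := by
  rw [← hunt_domains_key iocs _ inc, Option.map_map]
  rfl

-- ===== VERDICT (by name: the statement is the Claim_ definition above) =====
theorem hunt_domains_spec : Claim_equal_hunt_domains := by
  intro iocs queries inc _
  unfold Spec_hunt_domains hunt_domains hunt_domains_alt
  by_cases hi : iocs = []
  · subst hi
    rw [if_pos rfl]
    symm
    rw [List.filterMap_eq_nil_iff]
    intro query _
    dsimp only
    have h0 := hunt_domains_key ([] : List String)
      (PySem.Chars.lower ((PySem.Dict.ofList query).getD "query_name" "").toList) inc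
    rw [pvInnerA_eq_find?] at h0
    simp only [List.find?_nil] at h0
    rw [Option.map_eq_none_iff.mp h0]
    rfl
  · rw [if_neg hi]
    have hfun : (fun (ms : List (List (String × String))) (query : List (String × String)) =>
        let q := PySem.Dict.ofList query
        let qnl := PySem.Chars.lower (q.getD "query_name" "").toList
        match pvInnerA qnl inc iocs with
        | some d => ms ++ [pvEmit q d]
        | none => ms)
        = fun ms query =>
            ms ++ ((pvInnerA (PySem.Chars.lower ((PySem.Dict.ofList query).getD "query_name" "").toList)
                inc iocs).map (pvEmit (PySem.Dict.ofList query))).toList := by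
      funext ms query
      dsimp only
      cases pvInnerA (PySem.Chars.lower ((PySem.Dict.ofList query).getD "query_name" "").toList)
          inc iocs <;> simp
    rw [hfun, foldl_emit_eq_filterMap
        (fun query => (pvInnerA (PySem.Chars.lower ((PySem.Dict.ofList query).getD "query_name" "").toList)
            inc iocs).map (pvEmit (PySem.Dict.ofList query))) queries [],
      List.nil_append]
    dsimp only
    apply List.filterMap_congr
    intro query _
    exact (perquery_eq iocs inc query).symm
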